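-- pv_equiv track=rewrite | github.com/ronny-toribio/DyeGapAdjustmentTool | dgat.py | validateGapValue
-- ===== SOURCE A (Python) =====
-- GAP_VALUE_RANGE = [-200, -192, -184, -176, -168, -160, -152, -144, -136, -128, -120, -112, -104, -96, -88, -80, -72, -64, -56, -48, -40, -32, -24, -16, -8, 0, 8, 16, 24, 32, 40, 48, 56, 64, 72, 80, 88, 96, 104, 112, 120, 128, 136, 144, 152, 160, 168, 176, 184, 192, 200]
--
-- def validateGapValue(num):
--    try:
--       num = int(num)
--    except:
--       return 0
--    if num in GAP_VALUE_RANGE: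
--       return num
--    if num > 200:
--       return 200
--    if num < -200:
--       return -200
--    for i in GAP_VALUE_RANGE:
--       if i > num:
--          return i
-- ===== SOURCE B (Python) =====
-- def validateGapValue(num):
--    try:
--       num = int(num)
--    except:
--       return 0
--    if num > 200:
--       return 200
--    if num < -200:
--       return -200
--    return ((num + 7) // 8) * 8
-- ===== Notes on version B (the rewrite author's own statement) =====
-- stated objective: simpler
-- what changed: Replaced the explicit grid list, the membership test and the linear scan for the first larger grid value with a clamp to the valid range followed by a closed-form round-up to the nearest grid multiple.
import Mathlib
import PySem

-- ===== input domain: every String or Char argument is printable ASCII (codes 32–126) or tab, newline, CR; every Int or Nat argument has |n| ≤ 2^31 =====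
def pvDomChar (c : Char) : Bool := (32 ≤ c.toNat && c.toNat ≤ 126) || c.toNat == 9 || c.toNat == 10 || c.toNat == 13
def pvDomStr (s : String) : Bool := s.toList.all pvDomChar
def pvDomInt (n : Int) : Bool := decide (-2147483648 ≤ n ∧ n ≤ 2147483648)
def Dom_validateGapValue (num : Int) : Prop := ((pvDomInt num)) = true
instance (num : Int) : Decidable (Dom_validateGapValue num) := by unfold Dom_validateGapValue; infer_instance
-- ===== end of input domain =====

-- B replaces A's explicit grid list, membership test and linear scan with a clamp and a closed-form round-up to the nearest multiple of 8 (simpler).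


-- ===== PORT A =====
def gapValueRange : List Int := [-200, -192, -184, -176, -168, -160, -152, -144, -136, -128, -120, -112, -104, -96, -88, -80, -72, -64, -56, -48, -40, -32, -24, -16, -8, 0, 8, 16, 24, 32, 40, 48, 56, 64, 72, 80, 88, 96, 104, 112, 120, 128, 136, 144, 152, 160, 168, 176, 184, 192, 200]

-- the 'for i in GAP_VALUE_RANGE: if i > num: return i' loop; base case 0 is Python's
-- fall-through 'return None', unreachable for -200 < num < 200 (the only inputs that reach the loop)
def gapScan (num : Int) : List Int → Int
  | [] => 0
  | i :: rest => if i > num then i else gapScan num rest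

def validateGapValue (num : Int) : Int :=
  -- int(num) is the identity on an int argument; the except branch is unreachable
  if gapValueRange.contains num then num
  else if num > 200 then 200
  else if num < -200 then -200
  else gapScan num gapValueRange

-- ===== PORT B =====
def validateGapValue_alt (num : Int) : Int :=
  if num > 200 then 200
  else if num < -200 then -200
  else PySem.Int.floordiv (num + 7) 8 * 8

-- ===== PRECONDITION & SPEC =====
def Spec_validateGapValue (num : Int) (out : Int) : Prop := out = validateGapValue_alt num
instance (num : Int) (out : Int) : Decidable (Spec_validateGapValue num out) := by unfold Spec_validateGapValue; infer_instance

-- ===== CLAIM (what is proved, stated in full; the proofs are below) =====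
def Claim_equal_validateGapValue : Prop := ∀ (num : Int), Dom_validateGapValue num → Spec_validateGapValue num (validateGapValue num)

-- ===== LEMMAS AND PROOFS =====

-- every grid value lies in [-200, 200]
theorem mem_range_bounds (num : Int) (h : num ∈ gapValueRange) : -200 ≤ num ∧ num ≤ 200 := by
  simp only [gapValueRange, List.mem_cons, List.not_mem_nil, or_false] at h
  omega

-- finite check over the whole in-range grid interval
set_option maxRecDepth 4096 in
theorem key : ∀ k : Nat, k < 401 →
    validateGapValue ((k : Int) - 200) = validateGapValue_alt ((k : Int) - 200) := by
  decide

-- ===== VERDICT (by name: the statement is the Claim_ definition above) =====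
theorem validateGapValue_spec : Claim_equal_validateGapValue := by
  intro num _
  unfold Spec_validateGapValue
  by_cases hgt : num > 200
  · have hnm : num ∉ gapValueRange := fun h => by have := mem_range_bounds num h; omega
    simp [validateGapValue, validateGapValue_alt, hnm, hgt]
  · by_cases hlt : num < -200
    · have hnm : num ∉ gapValueRange := fun h => by have := mem_range_bounds num h; omega
      simp [validateGapValue, validateGapValue_alt, hnm, hgt, hlt]
    · have hk : num = ((num + 200).toNat : Int) - 200 := by omega
      have hk2 : (num + 200).toNat < 401 := by omega
      rw [hk]
      exact key _ hk2
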